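-- pv_equiv track=rewrite | github.com/dadashvespek/David_Weil | support.py | crop_list
-- ===== SOURCE A (Python) =====
-- def crop_list(data_list, start_marker, end_markers):
--     try:
--         start_index = data_list.index(start_marker)
--     except ValueError:
--         return []
--     end_index = len(data_list)
--
--     for marker in end_markers:
--         if marker in data_list:
--             end_index = min(end_index, data_list.index(marker))
--
--     # Crop the list from start_index to end_index
--     cropped_list = data_list[start_index:end_index]
--
--     return cropped_list
-- ===== SOURCE B (Python) =====
-- def crop_list(data_list, start_marker, end_markers):
--     start_index = None
--     end_index = None
--     for i, x in enumerate(data_list):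
--         if start_index is None and x == start_marker:
--             start_index = i
--         if end_index is None and x in end_markers:
--             end_index = i
--     if start_index is None:
--         return []
--     if end_index is None:
--         end_index = len(data_list)
--     return data_list[start_index:end_index]
-- ===== Notes on version B (the rewrite author's own statement) =====
-- stated objective: alternative
-- what changed: Replaced A's per-end-marker membership test + .index scan over data_list with a single enumerate pass that records the first start-marker position and the first position whose element is in end_markers.
import Mathlib
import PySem

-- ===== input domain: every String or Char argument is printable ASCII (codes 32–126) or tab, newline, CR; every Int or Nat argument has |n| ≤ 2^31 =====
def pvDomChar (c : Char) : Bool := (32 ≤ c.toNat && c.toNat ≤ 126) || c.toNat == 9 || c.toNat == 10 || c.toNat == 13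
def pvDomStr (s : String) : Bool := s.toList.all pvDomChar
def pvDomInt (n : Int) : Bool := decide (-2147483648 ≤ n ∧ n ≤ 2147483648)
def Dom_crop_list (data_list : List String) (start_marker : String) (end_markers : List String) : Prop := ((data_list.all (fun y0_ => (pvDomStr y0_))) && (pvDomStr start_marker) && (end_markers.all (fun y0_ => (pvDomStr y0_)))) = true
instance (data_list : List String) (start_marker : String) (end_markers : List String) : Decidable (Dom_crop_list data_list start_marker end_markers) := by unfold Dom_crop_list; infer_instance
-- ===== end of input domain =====

-- B replaces A's per-end-marker membership test + .index scan over data_list with a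
-- single enumerate pass that records the first start-marker position and the first
-- position whose element is an end marker (objective: alternative one-pass algorithm).

-- ===== PORT A =====
-- try: start_index = data_list.index(start_marker) / except ValueError: return []
-- is ported as a match on index? (none = the ValueError branch).
-- Inside the loop, data_list.index(marker) is guarded by 'marker in data_list',
-- so index? is some there; .getD 0 is never the default.
def crop_list (data_list : List String) (start_marker : String) (end_markers : List String) : List String :=
  match PySem.List.index? data_list start_marker with
  | none => []
  | some start_index =>
    let end_index : Nat := end_markers.foldl
      (fun end_index marker =>
        if marker ∈ data_list then
          min end_index ((PySem.List.index? data_list marker).getD 0)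
        else end_index)
      data_list.length
    PySem.List.slice data_list (some (start_index : Int)) (some (end_index : Int))

-- ===== PORT B =====
def crop_list_alt (data_list : List String) (start_marker : String) (end_markers : List String) : List String :=
  let p := (PySem.List.enumerate data_list 0).foldl
      (fun (acc : Option Int × Option Int) ix =>
        (if acc.1 = none ∧ ix.2 == start_marker then some ix.1 else acc.1,
         if acc.2 = none ∧ ix.2 ∈ end_markers then some ix.1 else acc.2))
      (none, none)
  match p.1 with
  | none => []
  | some start_index =>
    let end_index : Int := p.2.getD (data_list.length : Int)
    PySem.List.slice data_list (some start_index) (some end_index)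

-- ===== PRECONDITION & SPEC =====
def Spec_crop_list (data_list : List String) (start_marker : String) (end_markers : List String) (out : List String) : Prop := out = crop_list_alt data_list start_marker end_markers
instance (data_list : List String) (start_marker : String) (end_markers : List String) (out : List String) : Decidable (Spec_crop_list data_list start_marker end_markers out) := by unfold Spec_crop_list; infer_instance

-- ===== CLAIM (what is proved, stated in full; the proofs are below) =====
def Claim_equal_crop_list : Prop := ∀ (data_list : List String) (start_marker : String) (end_markers : List String), Dom_crop_list data_list start_marker end_markers → Spec_crop_list data_list start_marker end_markers (crop_list data_list start_marker end_markers)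

-- ===== LEMMAS AND PROOFS =====

-- first index of m in dl, or dl.length if absent
def pvJ (dl : List String) (m : String) : Nat :=
  if m ∈ dl then dl.idxOf m else dl.length

theorem pvJ_getD (dl : List String) (m : String) (h : m ∈ dl) :
    (PySem.List.index? dl m).getD 0 = dl.idxOf m := by
  have hlt : dl.idxOf m < dl.length := List.idxOf_lt_length_iff.2 h
  have hs : List.findIdx? (· == m) dl = some (dl.idxOf m) :=
    List.findIdx?_eq_some_iff_findIdx_eq.2 ⟨hlt, rfl⟩
  rw [PySem.List.index?_eq_idxOf?,
    show List.idxOf? m dl = List.findIdx? (· == m) dl from rfl, hs]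
  rfl

-- the first index where the element lies in m::rest is the min of pvJ m and the
-- first index where the element lies in rest
theorem pv_findIdx_cons_mem (m : String) (rest : List String) (dl : List String) :
    List.findIdx (fun x => decide (x ∈ (m :: rest))) dl
      = min (pvJ dl m) (List.findIdx (fun x => decide (x ∈ rest)) dl) := by
  induction dl with
  | nil => simp [pvJ]
  | cons x t ih =>
    by_cases hxm : x = m
    · subst hxm
      simp [List.findIdx_cons, pvJ, List.idxOf_cons_self]
    · by_cases hxr : x ∈ rest
      · simp [List.findIdx_cons, hxr, pvJ]
      · have hmem : (x ∈ m :: rest) = False := by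
          simp [hxm, hxr]
        have hJ : pvJ (x :: t) m = pvJ t m + 1 := by
          unfold pvJ
          by_cases hmt : m ∈ t
          · have : m ∈ x :: t := List.mem_cons_of_mem _ hmt
            rw [if_pos this, if_pos hmt, List.idxOf_cons_ne _ (by simpa using hxm)]
          · have : m ∉ x :: t := by
              intro hc; rcases List.mem_cons.1 hc with h1 | h2
              · exact hxm h1.symm
              · exact hmt h2
            rw [if_neg this, if_neg hmt]; simp
        simp only [List.findIdx_cons, hmem, decide_false, cond_false, hxr]
        rw [hJ]
        omega

-- A's fold over end_markers computes the first index whose element is an end marker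
theorem pvA_fold (dl : List String) (em : List String) (n : Nat) (hn : n ≤ dl.length) :
    em.foldl
      (fun end_index marker =>
        if marker ∈ dl then
          min end_index ((PySem.List.index? dl marker).getD 0)
        else end_index)
      n
      = min n (List.findIdx (fun x => decide (x ∈ em)) dl) := by
  induction em generalizing n with
  | nil =>
    have : List.findIdx (fun x => decide (x ∈ ([] : List String))) dl = dl.length := by
      rw [List.findIdx_eq_length]; intro x _; simp
    rw [List.foldl_nil, this, Nat.min_eq_left hn]
  | cons m rest ih =>
    have hstep : (if m ∈ dl then min n ((PySem.List.index? dl m).getD 0) else n)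
        = min n (pvJ dl m) := by
      by_cases hm : m ∈ dl
      · rw [if_pos hm, pvJ, if_pos hm, pvJ_getD dl m hm]
      · rw [if_neg hm, pvJ, if_neg hm, Nat.min_eq_left hn]
    rw [List.foldl_cons, hstep, ih _ (le_trans (Nat.min_le_left _ _) hn),
      pv_findIdx_cons_mem, Nat.min_assoc]

-- B's fold over enumerate computes the two first-occurrence indices
theorem pvB_fold (start_marker : String) (end_markers : List String)
    (dl : List String) (k : Int) (s e : Option Int) :
    (PySem.List.enumerate dl k).foldl
      (fun (acc : Option Int × Option Int) ix =>
        (if acc.1 = none ∧ ix.2 == start_marker then some ix.1 else acc.1,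
         if acc.2 = none ∧ ix.2 ∈ end_markers then some ix.1 else acc.2))
      (s, e)
      = (s.or ((List.findIdx? (· == start_marker) dl).map (fun i => k + (i : Int))),
         e.or ((List.findIdx? (fun x => decide (x ∈ end_markers)) dl).map (fun i => k + (i : Int)))) := by
  induction dl generalizing k s e with
  | nil => simp [PySem.List.enumerate_nil]
  | cons x t ih =>
    rw [PySem.List.enumerate_cons, List.foldl_cons, ih]
    congr 1
    · cases s with
      | some v => simp
      | none =>
        by_cases hx : x == start_marker
        · simp [hx, List.findIdx?_cons]
        · cases hq : List.findIdx? (· == start_marker) t with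
          | none => simp [hx, List.findIdx?_cons, hq]
          | some j =>
            simp [hx, List.findIdx?_cons, hq]
            ring
    · cases e with
      | some v => simp
      | none =>
        by_cases hx : x ∈ end_markers
        · simp [hx, List.findIdx?_cons]
        · cases hq : List.findIdx? (fun x => decide (x ∈ end_markers)) t with
          | none => simp [hx, List.findIdx?_cons, hq]
          | some j =>
            simp [hx, List.findIdx?_cons, hq]
            ring

-- ===== VERDICT (by name: the statement is the Claim_ definition above) =====
theorem crop_list_spec : Claim_equal_crop_list := by
  intro dl sm em _
  unfold Spec_crop_list crop_list crop_list_alt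
  rw [pvB_fold]
  simp only [Option.none_or]
  rw [PySem.List.index?_eq_idxOf?]
  rw [show List.idxOf? sm dl = List.findIdx? (· == sm) dl from rfl]
  cases hs : List.findIdx? (· == sm) dl with
  | none => simp
  | some si =>
    simp only [zero_add]
    have hA := pvA_fold dl em dl.length le_rfl
    have hfle : List.findIdx (fun x => decide (x ∈ em)) dl ≤ dl.length :=
      List.findIdx_le_length
    rw [hA, Nat.min_eq_right hfle]
    cases he : List.findIdx? (fun x => decide (x ∈ em)) dl with
    | none =>
      have : List.findIdx (fun x => decide (x ∈ em)) dl = dl.length := by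
        rw [List.findIdx_eq_length]
        intro x hx
        have := List.findIdx?_eq_none_iff.1 he x hx
        simpa using this
      simp [this]
    | some j =>
      have : List.findIdx (fun x => decide (x ∈ em)) dl = j :=
        (List.findIdx?_eq_some_iff_findIdx_eq.1 he).2
      simp [this]
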